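-- pv_equiv track=rewrite | github.com/THB-SCALE-C/evaluation | evaluation/metrics/rule_based/drag_text.py | has_adjacent_blanks
-- ===== SOURCE A (Python) =====
-- def has_adjacent_blanks(text: str) -> bool:
--     separators = ("", ", ", " and ", " or ")
--     i = 0
--     while True:
--         start = text.find("*", i)
--         if start == -1:
--             return False
--         end = text.find("*", start + 1)
--         if end == -1:
--             return False
--         for sep in separators:
--             if text.startswith(sep + "*", end + 1):
--                 next_start = end + 1 + len(sep)
--                 next_end = text.find("*", next_start + 1)
--                 if next_end != -1:
--                     return True
--         i = end + 1
-- ===== SOURCE B (Python) =====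
-- def has_adjacent_blanks(text: str) -> bool:
--     # Split once on "*".  With greedy pairing of stars, parts[1], parts[3], ...
--     # are blank contents and parts[2k] is the gap after the k-th blank.  Walk
--     # the parts after the first star two at a time: a blank is adjacent to a
--     # next one iff the gap is exactly a separator and the next blank's two
--     # stars both exist (at least 4 parts remain).
--     separators = ("", ", ", " and ", " or ")
--
--     def adjacent(rest):
--         if len(rest) < 2:
--             return False
--         if len(rest) >= 4 and rest[1] in separators:
--             return True
--         return adjacent(rest[2:])
--
--     return adjacent(text.split("*")[1:])
-- ===== Notes on version B (the rewrite author's own statement) =====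
-- stated objective: simpler
-- what changed: B splits the text once on the star delimiter and walks the resulting parts two at a time (blank content, gap) checking each gap against the separator tuple, instead of A's index-driven while-loop of repeated find/startswith scans.
import Mathlib
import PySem

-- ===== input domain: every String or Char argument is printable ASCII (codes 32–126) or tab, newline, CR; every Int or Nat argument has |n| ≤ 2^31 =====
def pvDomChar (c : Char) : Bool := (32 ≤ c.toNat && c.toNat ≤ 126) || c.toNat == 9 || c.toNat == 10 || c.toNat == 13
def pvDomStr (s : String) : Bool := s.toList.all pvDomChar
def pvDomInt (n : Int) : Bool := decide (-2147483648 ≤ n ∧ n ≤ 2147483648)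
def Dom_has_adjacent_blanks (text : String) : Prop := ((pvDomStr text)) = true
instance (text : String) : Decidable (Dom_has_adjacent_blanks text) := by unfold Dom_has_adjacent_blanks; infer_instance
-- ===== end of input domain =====

-- B replaces A's repeated find/startswith rescans by one split on '*' and a
-- two-at-a-time walk over the resulting parts (objective: simpler).

-- the tuple ("", ", ", " and ", " or ")
def pvSeps : List (List Char) := [[], [',', ' '], [' ', 'a', 'n', 'd', ' '], [' ', 'o', 'r', ' ']]

-- termination helper for the port of A's while-loop (cited in decreasing_by)
theorem pv_index?_lt_length {cs : List Char} {s : Nat}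
    (h : PySem.List.index? cs '*' = some s) : s < cs.length := by
  rw [PySem.List.index?_eq_some_iff] at h
  obtain ⟨pre, suf, rfl, rfl, -⟩ := h
  simp

-- ===== PORT A =====
-- Transliteration of A's while-loop as recursion on the suffix text[i:]:
-- text.find("*", i) is i plus the index of the first '*' in the suffix
-- (PySem.List.index?, none = -1), and every read A makes during one iteration
-- is at a position ≥ i, so working on suffixes is exact.
def has_adjacent_blanks_aux (cs : List Char) : Bool :=
  match h1 : PySem.List.index? cs '*' with
  | none => false                                     -- start == -1: return False
  | some s =>
    match h2 : PySem.List.index? (cs.drop (s + 1)) '*' with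
    | none => false                                   -- end == -1: return False
    | some e =>
      let after := (cs.drop (s + 1)).drop (e + 1)     -- text[end+1:]
      if pvSeps.any (fun sep =>
           -- text.startswith(sep + "*", end + 1)
           List.isPrefixOf (sep ++ ['*']) after &&
           -- next_end = text.find("*", next_start + 1); next_end != -1
           (after.drop (sep.length + 1)).contains '*')
      then true
      else has_adjacent_blanks_aux after              -- i = end + 1
termination_by cs.length
decreasing_by
  have hs := pv_index?_lt_length h1
  have he := pv_index?_lt_length h2
  simp only [List.length_drop] at *
  omega

def has_adjacent_blanks (text : String) : Bool :=
  has_adjacent_blanks_aux text.toList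

-- ===== PORT B =====
-- text.split("*") for the one-character separator "*" (Source B's split call)
def pvSplitStar : List Char → List (List Char)
  | [] => [[]]
  | c :: cs =>
    if c = '*' then [] :: pvSplitStar cs
    else
      match pvSplitStar cs with
      | p :: ps => (c :: p) :: ps
      | [] => [[c]]                                   -- unreachable: split is never empty

-- the inner recursive helper 'adjacent' of Source B
def pvAdjacent : List (List Char) → Bool
  | _ :: g :: rest =>
    if 2 ≤ rest.length ∧ g ∈ pvSeps then true         -- len(rest) >= 4 and rest[1] in separators
    else pvAdjacent rest                              -- adjacent(rest[2:])
  | _ => false                                        -- len(rest) < 2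

def has_adjacent_blanks_alt (text : String) : Bool :=
  pvAdjacent (pvSplitStar text.toList).tail           -- adjacent(text.split("*")[1:])

-- ===== PRECONDITION & SPEC =====
def Spec_has_adjacent_blanks (text : String) (out : Bool) : Prop := out = has_adjacent_blanks_alt text
instance (text : String) (out : Bool) : Decidable (Spec_has_adjacent_blanks text out) := by unfold Spec_has_adjacent_blanks; infer_instance

-- ===== CLAIM (what is proved, stated in full; the proofs are below) =====
def Claim_equal_has_adjacent_blanks : Prop := ∀ (text : String), Dom_has_adjacent_blanks text → Spec_has_adjacent_blanks text (has_adjacent_blanks text)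

-- ===== LEMMAS AND PROOFS =====

theorem pvSplitStar_ne_nil (cs : List Char) : pvSplitStar cs ≠ [] := by
  induction cs with
  | nil => simp [pvSplitStar]
  | cons c cs ih =>
    simp only [pvSplitStar]
    split
    · simp
    · cases h : pvSplitStar cs with
      | nil => simp
      | cons p ps => simp

theorem pvSplitStar_no_star {cs : List Char} (h : '*' ∉ cs) : pvSplitStar cs = [cs] := by
  induction cs with
  | nil => rfl
  | cons c cs ih =>
    simp only [List.mem_cons, not_or] at h
    simp only [pvSplitStar, if_neg (Ne.symm h.1), ih h.2]

theorem pvSplitStar_star {a : List Char} (cs' : List Char) (h : '*' ∉ a) :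
    pvSplitStar (a ++ '*' :: cs') = a :: pvSplitStar cs' := by
  induction a with
  | nil => simp [pvSplitStar]
  | cons c a ih =>
    simp only [List.mem_cons, not_or] at h
    simp only [List.cons_append, pvSplitStar, if_neg (Ne.symm h.1), ih h.2]

theorem pvSplitStar_length_iff (cs : List Char) : '*' ∈ cs ↔ 2 ≤ (pvSplitStar cs).length := by
  induction cs with
  | nil => simp [pvSplitStar]
  | cons c cs ih =>
    simp only [pvSplitStar, List.mem_cons]
    split
    · next hc =>
      subst hc
      have := pvSplitStar_ne_nil cs
      constructor
      · intro _; simp; cases h : pvSplitStar cs with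
        | nil => exact absurd h this
        | cons p ps => simp
      · intro _; left; rfl
    · next hc =>
      cases h : pvSplitStar cs with
      | nil => exact absurd h (pvSplitStar_ne_nil cs)
      | cons p ps =>
        rw [h] at ih
        simp only [List.length_cons] at ih ⊢
        constructor
        · rintro (h' | h')
          · exact absurd h'.symm hc
          · exact ih.1 h'
        · intro h'; right; exact ih.2 h'

theorem pvSplitStar_inv {cs : List Char} {g1 : List Char} {rest' : List (List Char)}
    (h : pvSplitStar cs = g1 :: rest') (hne : rest' ≠ []) :
    ∃ rest, cs = g1 ++ '*' :: rest ∧ '*' ∉ g1 ∧ pvSplitStar rest = rest' := by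
  induction cs generalizing g1 rest' with
  | nil =>
    simp only [pvSplitStar] at h
    injection h with h1 h2
    exact absurd h2.symm hne
  | cons c cs ih =>
    simp only [pvSplitStar] at h
    split at h
    · next hc =>
      subst hc
      obtain ⟨rfl, rfl⟩ := by simpa using h
      exact ⟨cs, by simp, by simp, rfl⟩
    · next hc =>
      cases hsp : pvSplitStar cs with
      | nil => exact absurd hsp (pvSplitStar_ne_nil cs)
      | cons p ps =>
        rw [hsp] at h
        obtain ⟨rfl, rfl⟩ := by simpa using h
        obtain ⟨rest, rfl, hnp, hrest⟩ := ih hsp hne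
        exact ⟨rest, by simp, by simp [Ne.symm hc, hnp], hrest⟩

theorem pv_drop_append (a : List Char) (x : Char) (b : List Char) :
    (a ++ x :: b).drop (a.length + 1) = b := by
  have : a ++ x :: b = (a ++ [x]) ++ b := by simp
  rw [this]
  have hl : a.length + 1 = (a ++ [x]).length := by simp
  rw [hl, List.drop_left]

-- the condition of A's inner for-loop, characterised via the split parts
theorem pv_cond_iff {cs'' g1 : List Char} {rest' : List (List Char)}
    (h : pvSplitStar cs'' = g1 :: rest') :
    (pvSeps.any (fun sep =>
        List.isPrefixOf (sep ++ ['*']) cs'' &&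
        (cs''.drop (sep.length + 1)).contains '*') = true)
      ↔ (2 ≤ rest'.length ∧ g1 ∈ pvSeps) := by
  have hstar : ∀ sep ∈ pvSeps, '*' ∉ sep := by decide
  rw [List.any_eq_true]
  constructor
  · rintro ⟨sep, hsep, hc⟩
    rw [Bool.and_eq_true, List.isPrefixOf_iff_prefix, List.contains_eq_mem, decide_eq_true_iff] at hc
    obtain ⟨⟨t, ht⟩, hmem⟩ := hc
    rw [List.append_assoc, List.singleton_append] at ht
    subst ht
    rw [pvSplitStar_star t (hstar sep hsep)] at h
    obtain ⟨rfl, rfl⟩ := by simpa using h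
    rw [pv_drop_append] at hmem
    exact ⟨(pvSplitStar_length_iff t).1 hmem, hsep⟩
  · rintro ⟨hlen, hmem⟩
    have hne : rest' ≠ [] := by intro h'; rw [h'] at hlen; simp at hlen
    obtain ⟨rest, rfl, hng, hrest⟩ := pvSplitStar_inv h hne
    refine ⟨g1, hmem, ?_⟩
    rw [Bool.and_eq_true, List.isPrefixOf_iff_prefix, List.contains_eq_mem, decide_eq_true_iff]
    constructor
    · exact ⟨rest, by simp⟩
    · rw [pv_drop_append]
      exact (pvSplitStar_length_iff rest).2 (hrest ▸ hlen)

theorem pv_main : ∀ (n : Nat) (cs : List Char), cs.length ≤ n →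
    has_adjacent_blanks_aux cs = pvAdjacent (pvSplitStar cs).tail := by
  intro n
  induction n with
  | zero =>
    intro cs hlen
    have : cs = [] := List.eq_nil_of_length_eq_zero (Nat.le_zero.mp hlen)
    subst this
    rw [has_adjacent_blanks_aux]
    simp [pvSplitStar, pvAdjacent]
  | succ n ih =>
    intro cs hlen
    rw [has_adjacent_blanks_aux]
    split
    · next h1 =>
      rw [PySem.List.index?_eq_none_iff] at h1
      rw [pvSplitStar_no_star h1]
      rfl
    · next s h1 =>
      split
      · next h2 =>
        rw [PySem.List.index?_eq_some_iff] at h1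
        obtain ⟨pre, suf, rfl, rfl, hnp⟩ := h1
        rw [pv_drop_append] at h2
        rw [PySem.List.index?_eq_none_iff] at h2
        rw [pvSplitStar_star suf hnp, pvSplitStar_no_star h2]
        rfl
      · next e h2 =>
        rw [PySem.List.index?_eq_some_iff] at h1
        obtain ⟨pre, suf, rfl, rfl, hnp⟩ := h1
        rw [pv_drop_append] at h2
        rw [PySem.List.index?_eq_some_iff] at h2
        obtain ⟨b, cs'', rfl, rfl, hnb⟩ := h2
        rw [pvSplitStar_star (b ++ '*' :: cs'') hnp, pvSplitStar_star cs'' hnb]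
        cases hsp : pvSplitStar cs'' with
        | nil => exact absurd hsp (pvSplitStar_ne_nil cs'')
        | cons g1 rest' =>
          simp only [List.tail_cons]
          rw [pvAdjacent]
          have hafter : (List.drop (b.length + 1)
              (List.drop (pre.length + 1) (pre ++ '*' :: (b ++ '*' :: cs'')))) = cs'' := by
            rw [pv_drop_append, pv_drop_append]
          by_cases hc : 2 ≤ rest'.length ∧ g1 ∈ pvSeps
          · rw [if_pos hc]
            have hcond := (pv_cond_iff hsp).2 hc
            simp only [hafter, hcond, if_true]
          · rw [if_neg hc]
            have hcond : (pvSeps.any (fun sep =>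
                List.isPrefixOf (sep ++ ['*']) cs'' &&
                (cs''.drop (sep.length + 1)).contains '*')) = false := by
              rw [Bool.eq_false_iff]
              intro h'; exact hc ((pv_cond_iff hsp).1 h')
            have hlen' : cs''.length ≤ n := by
              simp only [List.length_append, List.length_cons] at hlen
              omega
            simp only [hafter, hcond, Bool.false_eq_true, if_false]
            rw [ih cs'' hlen', hsp]
            rfl

-- ===== VERDICT (by name: the statement is the Claim_ definition above) =====
theorem has_adjacent_blanks_spec : Claim_equal_has_adjacent_blanks := by
  intro text _
  unfold Spec_has_adjacent_blanks has_adjacent_blanks has_adjacent_blanks_alt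
  exact pv_main text.toList.length text.toList le_rfl
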